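-- pv_equiv track=rewrite | github.com/CzmeleN/Uni | SI/l3/zad2.py | get_same_pixels
-- ===== SOURCE A (Python) =====
-- def get_same_pixels(poss, line):
--     """
--     zwraca powtarzajace sie (pewne okienka)
--     """
--     poss_no = len(poss)
--     if poss_no == 0:
--         return []
--
--     line_len = len(poss[0])
--     sums = [0] * line_len
--     for p in poss:
--         for i in range(line_len):
--             sums[i] += 1 if p[i] == 1 else 0
--
--     same_pixels = []
--     for i in range(line_len):
--         if sums[i] == 0 and line[i] != -1:
--             same_pixels.append([i, -1])
--         elif sums[i] == poss_no and line[i] != 1: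
--             same_pixels.append([i, 1])
--
--     return same_pixels
-- ===== SOURCE B (Python) =====
-- def get_same_pixels(poss, line):
--     if len(poss) == 0:
--         return []
--     same_pixels = []
--     for i in range(len(poss[0])):
--         if all(p[i] != 1 for p in poss):
--             if line[i] != -1:
--                 same_pixels.append([i, -1])
--         elif all(p[i] == 1 for p in poss):
--             if line[i] != 1:
--                 same_pixels.append([i, 1])
--     return same_pixels
-- ===== Notes on version B (the rewrite author's own statement) =====
-- stated objective: simpler
-- what changed: Replaced the precomputed sums accumulation table with independent per-column short-circuiting all() scans, so no counts array is built or maintained.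
import Mathlib
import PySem

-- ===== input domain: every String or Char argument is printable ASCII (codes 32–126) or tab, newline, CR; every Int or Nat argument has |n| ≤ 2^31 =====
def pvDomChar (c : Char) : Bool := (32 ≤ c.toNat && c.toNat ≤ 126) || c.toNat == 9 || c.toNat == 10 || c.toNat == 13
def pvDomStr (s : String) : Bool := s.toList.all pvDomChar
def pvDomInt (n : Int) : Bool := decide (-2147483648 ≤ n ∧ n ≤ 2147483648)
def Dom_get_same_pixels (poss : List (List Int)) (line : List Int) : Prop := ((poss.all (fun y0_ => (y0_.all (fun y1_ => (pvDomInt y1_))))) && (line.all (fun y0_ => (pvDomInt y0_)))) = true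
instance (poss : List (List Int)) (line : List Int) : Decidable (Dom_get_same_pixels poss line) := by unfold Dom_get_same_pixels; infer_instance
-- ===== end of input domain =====

-- B replaces A's accumulated per-column sums table with independent short-circuit
-- per-column scans (objective: simpler).

-- ===== PORT A =====
-- p[i] / line[i] (i ∈ range line_len, nonnegative) are ported as getD i 0; Pre_ guarantees
-- the index is in range, exactly where Python A returns without IndexError.
def get_same_pixels (poss : List (List Int)) (line : List Int) : List (List Int) :=
  if poss.length = 0 then []
  else
    let line_len := (poss.headD []).length
    let sums := poss.foldl (fun sums p =>
      (List.range line_len).foldl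
        (fun s i => s.set i (s.getD i 0 + (if p.getD i 0 = 1 then 1 else 0))) sums)
      (List.replicate line_len (0 : Int))
    (List.range line_len).foldl (fun acc i =>
      if sums.getD i 0 = 0 ∧ line.getD i 0 ≠ -1 then acc ++ [[(i : Int), -1]]
      else if sums.getD i 0 = (poss.length : Int) ∧ line.getD i 0 ≠ 1 then acc ++ [[(i : Int), 1]]
      else acc) []

-- ===== PORT B =====
def get_same_pixels_alt (poss : List (List Int)) (line : List Int) : List (List Int) :=
  match poss with
  | [] => []
  | p0 :: _ =>
    (List.range p0.length).foldl (fun res i =>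
      if poss.all (fun p => p.getD i 0 != 1) then
        (if line.getD i 0 ≠ -1 then res ++ [[(i : Int), -1]] else res)
      else if poss.all (fun p => p.getD i 0 == 1) then
        (if line.getD i 0 ≠ 1 then res ++ [[(i : Int), 1]] else res)
      else res) []

-- ===== PRECONDITION & SPEC =====
-- Pre_ excludes exactly the inputs where Python A raises IndexError: some row of poss,
-- or line, shorter than len(poss[0]).
def Pre_get_same_pixels (poss : List (List Int)) (line : List Int) : Prop :=
  poss = [] ∨ ((∀ p ∈ poss, (poss.headD []).length ≤ p.length) ∧ (poss.headD []).length ≤ line.length)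
instance (poss : List (List Int)) (line : List Int) : Decidable (Pre_get_same_pixels poss line) := by unfold Pre_get_same_pixels; infer_instance
def pvWitness_get_same_pixels : List (List Int) × List Int := ([[1, -1], [1, 0]], [0, 1])

def Spec_get_same_pixels (poss : List (List Int)) (line : List Int) (out : List (List Int)) : Prop := out = get_same_pixels_alt poss line
instance (poss : List (List Int)) (line : List Int) (out : List (List Int)) : Decidable (Spec_get_same_pixels poss line out) := by unfold Spec_get_same_pixels; infer_instance

-- ===== CLAIM (what is proved, stated in full; the proofs are below) =====
def Claim_equal_get_same_pixels : Prop := ∀ (poss : List (List Int)) (line : List Int), Dom_get_same_pixels poss line → Pre_get_same_pixels poss line → Spec_get_same_pixels poss line (get_same_pixels poss line)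

-- ===== LEMMAS AND PROOFS =====

-- A's inner loop: adds the 0/1 contribution of row p to every position < n.
lemma inner_char (p : List Int) (n : Nat) (sums : List Int) (h : n ≤ sums.length) :
    ((List.range n).foldl
      (fun s i => s.set i (s.getD i 0 + (if p.getD i 0 = 1 then 1 else 0))) sums).length = sums.length ∧
    ∀ j, ((List.range n).foldl
      (fun s i => s.set i (s.getD i 0 + (if p.getD i 0 = 1 then 1 else 0))) sums).getD j 0 =
        sums.getD j 0 + (if j < n ∧ p.getD j 0 = 1 then 1 else 0) := by
  induction n with
  | zero => simp
  | succ m ih =>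
    have hm : m ≤ sums.length := Nat.le_of_succ_le h
    obtain ⟨hlen, hget⟩ := ih hm
    rw [List.range_succ, List.foldl_append]
    set s' := (List.range m).foldl
      (fun s i => s.set i (s.getD i 0 + (if p.getD i 0 = 1 then 1 else 0))) sums with hs'
    have hmlt : m < s'.length := by omega
    constructor
    · simp [List.length_set, hlen]
    · intro j
      by_cases hj : j = m
      · subst hj
        have : (s'.set j (s'.getD j 0 + (if p.getD j 0 = 1 then 1 else 0))).getD j 0
            = s'.getD j 0 + (if p.getD j 0 = 1 then 1 else 0) := by
          simp [List.getD, List.getElem?_set_self (by omega : j < s'.length)]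
        simp only [List.foldl_cons, List.foldl_nil]
        rw [this, hget j]
        simp
      · have : (s'.set m (s'.getD m 0 + (if p.getD m 0 = 1 then 1 else 0))).getD j 0 = s'.getD j 0 := by
          simp [List.getD, List.getElem?_set_ne (by omega : m ≠ j)]
        simp only [List.foldl_cons, List.foldl_nil]
        rw [this, hget j]
        have hiff : (j < m ∧ p.getD j 0 = 1) ↔ (j < m + 1 ∧ p.getD j 0 = 1) := by
          constructor <;> intro ⟨a, b⟩ <;> exact ⟨by omega, b⟩
        rw [if_congr hiff rfl rfl]

-- A's outer loop: position j of the sums table counts the rows whose j-th entry is 1.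
lemma sums_char (poss : List (List Int)) (n : Nat) (sums : List Int) (h : n ≤ sums.length) :
    (poss.foldl (fun sums p =>
      (List.range n).foldl
        (fun s i => s.set i (s.getD i 0 + (if p.getD i 0 = 1 then 1 else 0))) sums) sums).length = sums.length ∧
    ∀ j, j < n →
    (poss.foldl (fun sums p =>
      (List.range n).foldl
        (fun s i => s.set i (s.getD i 0 + (if p.getD i 0 = 1 then 1 else 0))) sums) sums).getD j 0 =
      sums.getD j 0 + (poss.countP (fun p => p.getD j 0 == 1) : Int) := by
  induction poss generalizing sums with
  | nil => simp
  | cons p ps ih =>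
    obtain ⟨hlen, hget⟩ := inner_char p n sums h
    set s' := (List.range n).foldl
      (fun s i => s.set i (s.getD i 0 + (if p.getD i 0 = 1 then 1 else 0))) sums with hs'
    obtain ⟨ihlen, ihget⟩ := ih s' (by omega)
    constructor
    · simpa [hlen] using ihlen
    · intro j hj
      simp only [List.foldl_cons]
      rw [ihget j hj, hget j, List.countP_cons]
      by_cases hp : p.getD j 0 = 1 <;> simp [hj] <;> ring

-- ===== VERDICT (by name: the statement is the Claim_ definition above) =====
theorem get_same_pixels_spec : Claim_equal_get_same_pixels := by
  intro poss line _ _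
  unfold Spec_get_same_pixels get_same_pixels get_same_pixels_alt
  match poss with
  | [] => simp
  | p0 :: ps =>
    simp only [List.length_cons, List.headD_cons]
    rw [if_neg (by omega)]
    obtain ⟨_, hget⟩ := sums_char (p0 :: ps) p0.length (List.replicate p0.length (0 : Int)) (by simp)
    apply PySem.List.foldl_congr_mem
    intro acc i hi
    have hin : i < p0.length := List.mem_range.mp hi
    have hrep : (List.replicate p0.length (0 : Int)).getD i 0 = 0 := by
      simp [List.getD, hin]
    simp only [hget i hin, hrep, zero_add]
    set c := (p0 :: ps).countP (fun p => p.getD i 0 == 1) with hc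
    have hall1 : ((p0 :: ps).all (fun p => p.getD i 0 != 1) = true) ↔ (c : Int) = 0 := by
      rw [hc, show ((p0 :: ps).countP (fun p => p.getD i 0 == 1) : Int) = 0 ↔
           (p0 :: ps).countP (fun p => p.getD i 0 == 1) = 0 from by exact_mod_cast Iff.rfl]
      rw [List.countP_eq_zero, List.all_eq_true]
      simp
    have hall2 : ((p0 :: ps).all (fun p => p.getD i 0 == 1) = true) ↔ (c : Int) = ((ps.length + 1 : Nat) : Int) := by
      rw [hc, show ((p0 :: ps).countP (fun p => p.getD i 0 == 1) : Int) = ((ps.length + 1 : Nat) : Int) ↔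
           (p0 :: ps).countP (fun p => p.getD i 0 == 1) = ps.length + 1 from by exact_mod_cast Iff.rfl]
      rw [show ps.length + 1 = (p0 :: ps).length from rfl, List.countP_eq_length, List.all_eq_true]
    simp only [hall1, hall2]
    split_ifs <;> first | rfl | omega
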